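-- pv_equiv track=rewrite | github.com/apier98/rfdetr_training | moldvision/predictive/trainer.py | _is_contiguous_partial_subset
-- ===== SOURCE A (Python) =====
-- from typing import Any, Dict, List, Literal, Optional, Sequence, Tuple
--
-- def _is_contiguous_partial_subset(
--     trained_indices: Sequence[int],
--     total_members: int,
-- ) -> bool:
--     if total_members <= 1:
--         return bool(trained_indices)
--     if not trained_indices:
--         return False
--     ordered = sorted(set(int(index) for index in trained_indices))
--     if len(ordered) <= 0:
--         return False
--     expected = list(range(ordered[0], ordered[-1] + 1))
--     return ordered == expected
-- ===== SOURCE B (Python) =====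
-- def _is_contiguous_partial_subset(trained_indices, total_members):
--     if total_members <= 1:
--         return bool(trained_indices)
--     s = set(int(index) for index in trained_indices)
--     if not s:
--         return False
--     return max(s) - min(s) + 1 == len(s)
-- ===== Notes on version B (the rewrite author's own statement) =====
-- stated objective: faster
-- what changed: Replaces the sort-then-compare-against-a-materialised-range check with an O(n) arithmetic test on the deduplicated set: contiguous iff max - min + 1 == number of distinct elements.
import Mathlib
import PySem

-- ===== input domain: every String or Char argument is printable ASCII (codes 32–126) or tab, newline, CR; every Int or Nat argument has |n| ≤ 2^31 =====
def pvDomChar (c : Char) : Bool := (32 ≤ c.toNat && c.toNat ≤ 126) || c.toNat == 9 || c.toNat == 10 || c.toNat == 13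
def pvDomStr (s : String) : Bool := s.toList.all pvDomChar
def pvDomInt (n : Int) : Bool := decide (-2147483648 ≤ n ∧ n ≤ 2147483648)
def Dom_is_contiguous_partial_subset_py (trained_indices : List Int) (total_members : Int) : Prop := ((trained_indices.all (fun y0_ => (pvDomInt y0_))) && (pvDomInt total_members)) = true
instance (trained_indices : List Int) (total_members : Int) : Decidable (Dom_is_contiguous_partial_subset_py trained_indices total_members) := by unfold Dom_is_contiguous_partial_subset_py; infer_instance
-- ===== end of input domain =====

-- B replaces A's sort + explicit range comparison by the O(n) test max - min + 1 == len(set).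

-- ===== PORT A =====
def is_contiguous_partial_subset_py (trained_indices : List Int) (total_members : Int) : Bool :=
  if total_members ≤ 1 then !trained_indices.isEmpty
  else if trained_indices.isEmpty then false
  else
    let ordered := PySem.List.sorted (PySem.Set.ofList (trained_indices.map (fun index => index))) (fun x => x) false
    if ordered.length ≤ 0 then false
    else
      let expected := PySem.List.pyRange (PySem.List.pyGetD ordered 0 0) (PySem.List.pyGetD ordered (-1) 0 + 1) 1
      decide (ordered = expected)

-- ===== PORT B =====
def is_contiguous_partial_subset_py_alt (trained_indices : List Int) (total_members : Int) : Bool :=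
  if total_members ≤ 1 then !trained_indices.isEmpty
  else
    let s := PySem.Set.ofList (trained_indices.map (fun index => index))
    if s.isEmpty then false
    else
      match PySem.List.max? s (fun x => x), PySem.List.min? s (fun x => x) with
      | some mx, some mn => decide (mx - mn + 1 = (s.length : Int))
      | _, _ => false

-- ===== PRECONDITION & SPEC =====
def Spec_is_contiguous_partial_subset_py (trained_indices : List Int) (total_members : Int) (out : Bool) : Prop := out = is_contiguous_partial_subset_py_alt trained_indices total_members
instance (trained_indices : List Int) (total_members : Int) (out : Bool) : Decidable (Spec_is_contiguous_partial_subset_py trained_indices total_members out) := by unfold Spec_is_contiguous_partial_subset_py; infer_instance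

-- ===== CLAIM (what is proved, stated in full; the proofs are below) =====
def Claim_equal_is_contiguous_partial_subset_py : Prop := ∀ (trained_indices : List Int) (total_members : Int), Dom_is_contiguous_partial_subset_py trained_indices total_members → Spec_is_contiguous_partial_subset_py trained_indices total_members (is_contiguous_partial_subset_py trained_indices total_members)

-- ===== LEMMAS AND PROOFS =====

-- in a (≤)-pairwise list every element is at most the last one
lemma le_getLast_of_pairwise_le (l : List Int) (hl : l ≠ []) (hp : l.Pairwise (· ≤ ·)) :
    ∀ x ∈ l, x ≤ l.getLast hl := by
  induction l with
  | nil => simp at hl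
  | cons a t ih =>
    intro x hx
    rcases List.mem_cons.mp hx with rfl | hxt
    · cases t with
      | nil => simp
      | cons b u =>
        have hab : x ≤ b := (List.pairwise_cons.mp hp).1 b (by simp)
        have := ih (by simp) (List.pairwise_cons.mp hp).2 b (by simp)
        calc x ≤ b := hab
          _ ≤ _ := by simpa [List.getLast] using this
    · cases t with
      | nil => simp at hxt
      | cons b u =>
        have := ih (by simp) (List.pairwise_cons.mp hp).2 x hxt
        simpa [List.getLast] using this

lemma head_le_of_pairwise_le (l : List Int) (hl : l ≠ []) (hp : l.Pairwise (· ≤ ·)) :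
    ∀ x ∈ l, l.head hl ≤ x := by
  cases l with
  | nil => simp at hl
  | cons a t =>
    intro x hx
    rcases List.mem_cons.mp hx with rfl | hxt
    · simp
    · exact (List.pairwise_cons.mp hp).1 x hxt

-- the key characterisation: a strictly increasing nonempty Int list equals
-- range(head, last+1) iff last - head + 1 equals its length
lemma pairwise_lt_eq_range_iff (l : List Int) (hl : l ≠ []) (hp : l.Pairwise (· < ·)) :
    l = PySem.List.pyRange (l.head hl) (l.getLast hl + 1) 1 ↔
      l.getLast hl - l.head hl + 1 = (l.length : Int) := by
  have hple : l.Pairwise (· ≤ ·) := hp.imp (fun h => le_of_lt h)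
  have hhead_mem : l.head hl ∈ l := List.head_mem hl
  have hlast_mem : l.getLast hl ∈ l := List.getLast_mem hl
  have hhl : l.head hl ≤ l.getLast hl := head_le_of_pairwise_le l hl hple _ hlast_mem
  constructor
  · intro heq
    have hlen := congrArg List.length heq
    rw [PySem.List.length_pyRange_one] at hlen
    omega
  · intro hlen
    have hnodup : l.Nodup := hp.imp (fun h => ne_of_lt h)
    have hsub : l ⊆ PySem.List.pyRange (l.head hl) (l.getLast hl + 1) 1 := by
      intro x hx
      rw [PySem.List.mem_pyRange_one]
      exact ⟨head_le_of_pairwise_le l hl hple x hx,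
        by have := le_getLast_of_pairwise_le l hl hple x hx; omega⟩
    have hlen' : (PySem.List.pyRange (l.head hl) (l.getLast hl + 1) 1).length = l.length := by
      rw [PySem.List.length_pyRange_one]; omega
    have hperm : l.Perm (PySem.List.pyRange (l.head hl) (l.getLast hl + 1) 1) :=
      (List.subperm_of_subset hnodup hsub).perm_of_length_le (le_of_eq hlen')
    exact hperm.eq_of_pairwise (fun a b _ _ h h' => absurd h' (lt_asymm h)) hp
      (PySem.List.pairwise_lt_pyRange_one _ _)

theorem is_contiguous_partial_subset_py_main (trained_indices : List Int) (total_members : Int) :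
    is_contiguous_partial_subset_py trained_indices total_members =
      is_contiguous_partial_subset_py_alt trained_indices total_members := by
  simp only [is_contiguous_partial_subset_py, is_contiguous_partial_subset_py_alt]
  by_cases htm : total_members ≤ 1
  · simp [htm]
  · simp only [htm, if_false]
    by_cases hti : trained_indices.isEmpty
    · have h0 : trained_indices = [] := List.isEmpty_iff.mp hti
      subst h0
      simp [PySem.Set.ofList]
    · have hti' : trained_indices.isEmpty = false := by simpa using hti
      have hne : trained_indices ≠ [] := by simpa [List.isEmpty_iff] using hti
      set s := PySem.Set.ofList (trained_indices.map (fun index => index)) with hs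
      have hsne : s ≠ [] := by
        intro h
        rcases List.exists_cons_of_ne_nil hne with ⟨a, t, rfl⟩
        have ha : a ∈ s := by
          rw [hs]; exact (PySem.Set.mem_ofList _ _).mpr (by simp)
        rw [h] at ha; simp at ha
      have hsie : s.isEmpty = false := by
        simpa [List.isEmpty_iff] using hsne
      set ordered := PySem.List.sorted s (fun x => x) false with hord
      have hordne : ordered ≠ [] := by
        rw [hord]; intro h; exact hsne ((PySem.List.sorted_eq_nil_iff ..).mp h)
      have hp : ordered.Pairwise (· < ·) := by
        rw [hord, hs]; exact PySem.List.sorted_ofList_pairwise_lt _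
      have hple : ordered.Pairwise (· ≤ ·) := hp.imp (fun h => le_of_lt h)
      have hlen : ordered.length = s.length := by
        rw [hord]; exact PySem.List.length_sorted ..
      have hmem_ord : ∀ x : Int, x ∈ ordered ↔ x ∈ s := fun x => by
        rw [hord]; exact PySem.List.mem_sorted ..
      obtain ⟨mx, hmx⟩ : ∃ mx, PySem.List.max? s (fun x => x) = some mx := by
        cases h : PySem.List.max? s (fun x => x) with
        | none => exact absurd ((PySem.List.max?_eq_none_iff ..).mp h) hsne
        | some mx => exact ⟨mx, rfl⟩
      obtain ⟨mn, hmn⟩ : ∃ mn, PySem.List.min? s (fun x => x) = some mn := by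
        cases h : PySem.List.min? s (fun x => x) with
        | none => exact absurd ((PySem.List.min?_eq_none_iff ..).mp h) hsne
        | some mn => exact ⟨mn, rfl⟩
      have hhead : ordered.head hordne = mn :=
        le_antisymm
          (head_le_of_pairwise_le ordered hordne hple mn
            ((hmem_ord mn).mpr (PySem.List.min?_mem hmn)))
          (PySem.List.min?_isMin hmn _ ((hmem_ord _).mp (List.head_mem hordne)))
      have hlast : ordered.getLast hordne = mx :=
        le_antisymm
          (PySem.List.max?_isMax hmx _ ((hmem_ord _).mp (List.getLast_mem hordne)))
          (le_getLast_of_pairwise_le ordered hordne hple mx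
            ((hmem_ord mx).mpr (PySem.List.max?_mem hmx)))
      have hlen0 : ¬ ordered.length ≤ 0 := by
        intro h
        exact hordne (List.length_eq_zero_iff.mp (Nat.le_zero.mp h))
      have h0 : PySem.List.pyGetD ordered 0 0 = ordered.head hordne := by
        rcases List.exists_cons_of_ne_nil hordne with ⟨a, t, he⟩
        simp [he, PySem.List.pyGetD_zero_cons]
      simp only [hti', Bool.false_eq_true, if_false, hsie, hmx, hmn, if_neg hlen0,
        h0, PySem.List.pyGetD_neg_one ordered 0 hordne, hhead, hlast]
      rw [decide_eq_decide]
      have hkey := pairwise_lt_eq_range_iff ordered hordne hp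
      rw [hhead, hlast, hlen] at hkey
      exact hkey

-- ===== VERDICT (by name: the statement is the Claim_ definition above) =====
theorem is_contiguous_partial_subset_py_spec : Claim_equal_is_contiguous_partial_subset_py := by
  intro trained_indices total_members _
  exact (is_contiguous_partial_subset_py_main trained_indices total_members).symm ▸ rfl
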